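-- pv_equiv track=rewrite | github.com/pradeep1429/pythonProject | basics/problems.py | subsets_with_zero_sum
-- ===== SOURCE A (Python) =====
-- import itertools
--
-- def subsets_with_zero_sum(nums):
--     subsets = []
--
--     # Generate subsets of different lengths
--     for length in range(4):
--         # Generate subsets of current length
--         for subset in itertools.combinations(nums, length):
--             # Only add to results if sum is 0
--             if sum(subset) == 0:
--                 sublist = list(subset)
--                 if len(sublist).__ne__(0):
--                     subsets.append(sublist)
--
--     return subsets
-- ===== SOURCE B (Python) =====
-- def subsets_with_zero_sum(nums):
--     res = []
--     # length-1 subsets: the zeros, in order of appearance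
--     for v in nums:
--         if v == 0:
--             res.append([v])
--     # counts of every value in the whole list
--     cnt = {}
--     for v in nums:
--         cnt[v] = cnt.get(v, 0) + 1
--     # length-2 subsets: for each i, every j > i with nums[j] == -nums[i]
--     # contributes [nums[i], -nums[i]]; count them with a suffix counter.
--     c = dict(cnt)
--     for v in nums:
--         c[v] = c.get(v, 0) - 1
--         res.extend([[v, -v]] * c.get(-v, 0))
--     # length-3 subsets: for each pair i < j, every k > j with
--     # nums[k] == -(nums[i]+nums[j]) contributes [nums[i], nums[j], t].
--     c = dict(cnt)
--     for i in range(len(nums)):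
--         v = nums[i]
--         c[v] = c.get(v, 0) - 1
--         c2 = dict(c)
--         for j in range(i + 1, len(nums)):
--             w = nums[j]
--             c2[w] = c2.get(w, 0) - 1
--             t = -(v + w)
--             res.extend([[v, w, t]] * c2.get(t, 0))
--     return res
-- ===== Notes on version B (the rewrite author's own statement) =====
-- stated objective: faster
-- what changed: Replaces the itertools.combinations enumeration of all subsets of length 0..3 by direct construction: zero singletons in one pass, and for pairs/triples a suffix value-counter so each pair (i,j) contributes its completing third value with a multiplicity lookup instead of scanning all k.
import Mathlib
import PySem

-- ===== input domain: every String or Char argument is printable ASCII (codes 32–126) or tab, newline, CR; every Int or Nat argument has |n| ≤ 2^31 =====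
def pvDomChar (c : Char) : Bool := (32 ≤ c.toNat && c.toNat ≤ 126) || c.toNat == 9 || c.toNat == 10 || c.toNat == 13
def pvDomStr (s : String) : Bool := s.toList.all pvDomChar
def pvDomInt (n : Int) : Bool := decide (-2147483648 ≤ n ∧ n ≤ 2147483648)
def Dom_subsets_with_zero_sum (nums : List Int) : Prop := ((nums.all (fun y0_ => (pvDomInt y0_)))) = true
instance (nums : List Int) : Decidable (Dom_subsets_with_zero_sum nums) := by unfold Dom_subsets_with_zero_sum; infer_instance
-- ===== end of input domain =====

-- B replaces A's length-0..3 itertools.combinations enumeration by direct construction of the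
-- zero singletons, pairs and triples using suffix counters (O(n^2+output) instead of O(n^3)): objective faster.


-- ===== PORT A =====
-- itertools.combinations(nums, r) in itertools' index-lexicographic order
def pvComb (l : List Int) (k : Nat) : List (List Int) :=
  match l, k with
  | _, 0 => [[]]
  | [], _ + 1 => []
  | x :: xs, k + 1 => (pvComb xs k).map (x :: ·) ++ pvComb xs (k + 1)

def subsets_with_zero_sum (nums : List Int) : List (List Int) :=
  (List.range 4).foldl (fun subsets length =>
    (pvComb nums length).foldl (fun subsets subset =>
      if subset.sum == 0 then
        (if subset.length ≠ 0 then subsets ++ [subset] else subsets)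
      else subsets) subsets) []

-- ===== PORT B =====
-- the pair loop: for v in nums: c[v] = c.get(v,0) - 1; res.extend([[v,-v]] * c.get(-v,0))
def pvPairLoop (c : PySem.Dict Int Int) (l : List Int) (res : List (List Int)) : List (List Int) :=
  match l with
  | [] => res
  | v :: rest =>
    let c' := c.insert v (c.getD v 0 - 1)
    pvPairLoop c' rest (res ++ List.replicate (c'.getD (-v) 0).toNat [v, -v])

-- the inner j-loop of the triple loop
def pvTripInner (v : Int) (c2 : PySem.Dict Int Int) (l : List Int) (res : List (List Int)) : List (List Int) :=
  match l with
  | [] => res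
  | w :: rest =>
    let c2' := c2.insert w (c2.getD w 0 - 1)
    pvTripInner v c2' rest (res ++ List.replicate (c2'.getD (-(v + w)) 0).toNat [v, w, -(v + w)])

-- the outer i-loop of the triple loop (c2 = dict(c) is a value copy)
def pvTripLoop (c : PySem.Dict Int Int) (l : List Int) (res : List (List Int)) : List (List Int) :=
  match l with
  | [] => res
  | v :: rest =>
    let c' := c.insert v (c.getD v 0 - 1)
    pvTripLoop c' rest (pvTripInner v c' rest res)

def subsets_with_zero_sum_alt (nums : List Int) : List (List Int) :=
  let res := nums.foldl (fun r v => if v == 0 then r ++ [[v]] else r) []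
  let cnt := nums.foldl (fun d v => d.insert v (d.getD v 0 + 1)) PySem.Dict.empty
  let res := pvPairLoop cnt nums res
  pvTripLoop cnt nums res

-- ===== PRECONDITION & SPEC =====
def Spec_subsets_with_zero_sum (nums : List Int) (out : List (List Int)) : Prop := out = subsets_with_zero_sum_alt nums
instance (nums : List Int) (out : List (List Int)) : Decidable (Spec_subsets_with_zero_sum nums out) := by unfold Spec_subsets_with_zero_sum; infer_instance

-- ===== CLAIM (what is proved, stated in full; the proofs are below) =====
def Claim_equal_subsets_with_zero_sum : Prop := ∀ (nums : List Int), Dom_subsets_with_zero_sum nums → Spec_subsets_with_zero_sum nums (subsets_with_zero_sum nums)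

-- ===== LEMMAS AND PROOFS =====

-- reference shapes of B's three result segments
def pvPairsFrom : List Int → List (List Int)
  | [] => []
  | v :: rest => List.replicate (rest.count (-v)) [v, -v] ++ pvPairsFrom rest

def pvInnerFrom (v : Int) : List Int → List (List Int)
  | [] => []
  | w :: rest => List.replicate (rest.count (-(v + w))) [v, w, -(v + w)] ++ pvInnerFrom v rest

def pvTripFrom : List Int → List (List Int)
  | [] => []
  | v :: rest => pvInnerFrom v rest ++ pvTripFrom rest

-- counter invariant: c holds the multiplicities of l
def pvInv (c : PySem.Dict Int Int) (l : List Int) : Prop := ∀ t : Int, c.getD t 0 = (l.count t : Int)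

lemma pvInv_dec {c : PySem.Dict Int Int} {v : Int} {rest : List Int}
    (h : pvInv c (v :: rest)) : pvInv (c.insert v (c.getD v 0 - 1)) rest := by
  intro t
  rw [PySem.Dict.getD_insert]
  by_cases ht : t = v
  · subst ht
    rw [if_pos rfl, h t, List.count_cons_self]
    push_cast; ring
  · rw [if_neg ht, h t]
    norm_cast
    simp [(Ne.symm ht : v ≠ t)]

lemma pvPairLoop_eq (l : List Int) (c : PySem.Dict Int Int) (res : List (List Int))
    (h : pvInv c l) : pvPairLoop c l res = res ++ pvPairsFrom l := by
  induction l generalizing c res with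
  | nil => simp [pvPairLoop, pvPairsFrom]
  | cons v rest ih =>
    have h' := pvInv_dec h
    simp only [pvPairLoop, pvPairsFrom]
    rw [ih _ _ h', h' (-v)]
    simp [List.append_assoc]

lemma pvTripInner_eq (v : Int) (l : List Int) (c : PySem.Dict Int Int) (res : List (List Int))
    (h : pvInv c l) : pvTripInner v c l res = res ++ pvInnerFrom v l := by
  induction l generalizing c res with
  | nil => simp [pvTripInner, pvInnerFrom]
  | cons w rest ih =>
    have h' := pvInv_dec h
    simp only [pvTripInner, pvInnerFrom]
    rw [ih _ _ h', h' (-(v + w))]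
    simp [List.append_assoc]

lemma pvTripLoop_eq (l : List Int) (c : PySem.Dict Int Int) (res : List (List Int))
    (h : pvInv c l) : pvTripLoop c l res = res ++ pvTripFrom l := by
  induction l generalizing c res with
  | nil => simp [pvTripLoop, pvTripFrom]
  | cons v rest ih =>
    have h' := pvInv_dec h
    simp only [pvTripLoop, pvTripFrom]
    rw [pvTripInner_eq v rest _ res h', ih _ _ h']
    simp [List.append_assoc]

-- === A-side: filters of pvComb ===
def pvP (s : List Int) : Bool := (s.sum == 0) && decide (s.length ≠ 0)

lemma pvComb_zero (l : List Int) : pvComb l 0 = [[]] := by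
  cases l <;> rfl

lemma pvComb_one (l : List Int) : pvComb l 1 = l.map (fun v => [v]) := by
  induction l with
  | nil => rfl
  | cons x xs ih => simp [pvComb, pvComb_zero, ih]

lemma pvComb_len (l : List Int) (k : Nat) : ∀ s ∈ pvComb l k, s.length = k := by
  induction l generalizing k with
  | nil =>
    intro s hs
    cases k with
    | zero => simp [pvComb] at hs; simp [hs]
    | succ k => simp [pvComb] at hs
  | cons x xs ih =>
    intro s hs
    cases k with
    | zero => rw [pvComb_zero] at hs; simp at hs; simp [hs]
    | succ k =>
      simp only [pvComb, List.mem_append, List.mem_map] at hs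
      rcases hs with ⟨a, ha, rfl⟩ | hs
      · simp [ih k a ha]
      · exact ih (k + 1) s hs

lemma pv_filter_one (l : List Int) :
    (pvComb l 1).filter pvP = (l.filter (fun v => v == 0)).map (fun v => [v]) := by
  rw [pvComb_one, List.filter_map]
  congr 1
  apply List.filter_congr
  intro v _
  simp [pvP, Function.comp]

-- pairs of sum t, in combination order
def pvPairsT (t : Int) : List Int → List (List Int)
  | [] => []
  | w :: rest => List.replicate (rest.count (t - w)) [w, t - w] ++ pvPairsT t rest

lemma pv_filter_pairsT (t : Int) (l : List Int) :
    (pvComb l 2).filter (fun s => s.sum == t) = pvPairsT t l := by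
  induction l with
  | nil => rfl
  | cons v rest ih =>
    show (((pvComb rest 1).map (v :: ·) ++ pvComb rest 2).filter (fun s => s.sum == t)) = _
    rw [List.filter_append, ih, pvComb_one, List.map_map, List.filter_map]
    show List.map _ (List.filter ((fun s => List.sum s == t) ∘ fun w => [v, w]) rest) ++ _ = _
    have h1 : List.filter ((fun s => List.sum s == t) ∘ fun w => [v, w]) rest
        = List.filter (· == t - v) rest := by
      apply List.filter_congr
      intro w _
      simp only [Function.comp, List.sum_cons, List.sum_nil, add_zero]
      rw [Bool.eq_iff_iff]
      simp only [beq_iff_eq]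
      omega
    rw [h1, List.filter_beq, List.map_replicate]
    rfl

lemma pv_filter_sum (k : Nat) (hk : k ≠ 0) (l : List Int) :
    (pvComb l k).filter pvP = (pvComb l k).filter (fun s => s.sum == 0) := by
  apply List.filter_congr
  intro s hs
  have hlen : s.length = k := pvComb_len l k s hs
  simp [pvP, hlen, hk]

lemma pvPairsT_zero (l : List Int) : pvPairsT 0 l = pvPairsFrom l := by
  induction l with
  | nil => rfl
  | cons v rest ih => simp [pvPairsT, pvPairsFrom, ih, zero_sub]

lemma pv_filter_two (l : List Int) :
    (pvComb l 2).filter pvP = pvPairsFrom l := by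
  rw [pv_filter_sum 2 (by decide), pv_filter_pairsT, pvPairsT_zero]

lemma pv_map_pairsT (v : Int) (l : List Int) :
    (pvPairsT (-v) l).map (v :: ·) = pvInnerFrom v l := by
  induction l with
  | nil => rfl
  | cons w rest ih =>
    simp only [pvPairsT, pvInnerFrom, List.map_append, List.map_replicate, ih]
    have h : -v - w = -(v + w) := by ring
    rw [h]

lemma pv_filter_three (l : List Int) :
    (pvComb l 3).filter pvP = pvTripFrom l := by
  rw [pv_filter_sum 3 (by decide)]
  induction l with
  | nil => rfl
  | cons v rest ih =>
    show (((pvComb rest 2).map (v :: ·) ++ pvComb rest 3).filter (fun s => s.sum == 0)) = _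
    rw [List.filter_append, ih, List.filter_map]
    have h2 : List.filter ((fun s => List.sum s == 0) ∘ (v :: ·)) (pvComb rest 2)
        = List.filter (fun s => s.sum == -v) (pvComb rest 2) := by
      apply List.filter_congr
      intro s _
      simp only [Function.comp, List.sum_cons]
      rw [Bool.eq_iff_iff]
      simp only [beq_iff_eq]
      omega
    rw [h2, pv_filter_pairsT, pv_map_pairsT]
    rfl

-- A's inner foldl appends the pvP-filtered subsets
lemma pvA_inner (xs : List (List Int)) (acc : List (List Int)) :
    xs.foldl (fun subsets subset =>
      if subset.sum == 0 then
        (if subset.length ≠ 0 then subsets ++ [subset] else subsets)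
      else subsets) acc = acc ++ xs.filter pvP := by
  induction xs generalizing acc with
  | nil => simp
  | cons s rest ih =>
    rw [List.foldl_cons]
    have hstep : (if s.sum == 0 then (if s.length ≠ 0 then acc ++ [s] else acc) else acc)
        = if pvP s then acc ++ [s] else acc := by
      by_cases h1 : s.sum = 0 <;> by_cases h2 : s.length = 0 <;> simp [pvP, h1, h2]
    rw [hstep, ih, List.filter_cons]
    by_cases hp : pvP s
    · rw [if_pos hp, if_pos hp, List.append_assoc, List.singleton_append]
    · rw [if_neg hp, if_neg (by simp [hp])]

-- B's first loop collects the zero singletons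
lemma pvB_singles (l : List Int) (acc : List (List Int)) :
    l.foldl (fun r v => if v == 0 then r ++ [[v]] else r) acc
      = acc ++ (l.filter (fun v => v == 0)).map (fun v => [v]) := by
  induction l generalizing acc with
  | nil => simp
  | cons v rest ih =>
    rw [List.foldl_cons]
    by_cases h : v = 0
    · rw [if_pos (by simp [h]), ih, List.filter_cons, if_pos (by simp [h]),
        List.map_cons, List.append_assoc, List.singleton_append]
    · rw [if_neg (by simp [h]), ih, List.filter_cons, if_neg (by simp [h])]

lemma pvCnt_inv (nums : List Int) :
    pvInv (nums.foldl (fun d v => d.insert v (d.getD v 0 + 1)) PySem.Dict.empty) nums := by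
  intro t
  rw [PySem.Dict.getD_foldl_insert_add_one, PySem.Dict.getD_empty, zero_add]

-- ===== VERDICT (by name: the statement is the Claim_ definition above) =====
theorem subsets_with_zero_sum_spec : Claim_equal_subsets_with_zero_sum := by
  intro nums _
  unfold Spec_subsets_with_zero_sum subsets_with_zero_sum subsets_with_zero_sum_alt
  show _ = pvTripLoop (nums.foldl (fun d v => d.insert v (d.getD v 0 + 1)) PySem.Dict.empty) nums
      (pvPairLoop (nums.foldl (fun d v => d.insert v (d.getD v 0 + 1)) PySem.Dict.empty) nums
        (nums.foldl (fun r v => if v == 0 then r ++ [[v]] else r) []))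
  have hinv := pvCnt_inv nums
  rw [pvTripLoop_eq nums _ _ hinv, pvPairLoop_eq nums _ _ hinv, pvB_singles]
  show (List.foldl _ [] [0, 1, 2, 3]) = _
  simp only [List.foldl_cons, List.foldl_nil]
  rw [pvA_inner, pvA_inner, pvA_inner, pvA_inner]
  rw [pvComb_zero, pv_filter_one, pv_filter_two, pv_filter_three]
  simp [List.append_assoc, pvP]
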